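-- pv_equiv track=rewrite | github.com/blueandhack/PiWatchdog | src/pi_watchdog_ui.py | trailing_failures
-- ===== SOURCE A (Python) =====
-- def trailing_failures(snaps: list[dict], key: str):
--     count = 0
--     for snap in reversed(snaps):
--         if snap.get(key) != "ok":
--             count += 1
--         else:
--             break
--     return count
-- ===== SOURCE B (Python) =====
-- def trailing_failures(snaps: list[dict], key: str):
--     last_ok = -1
--     for i, snap in enumerate(snaps):
--         if snap.get(key) == "ok":
--             last_ok = i
--     return len(snaps) - 1 - last_ok
-- ===== Notes on version B (the rewrite author's own statement) =====
-- stated objective: alternative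
-- what changed: Replaces the reversed loop with early break by a single forward pass that records the index of the last 'ok' snapshot and derives the trailing-failure count as len(snaps) - 1 - last_ok.
import Mathlib
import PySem

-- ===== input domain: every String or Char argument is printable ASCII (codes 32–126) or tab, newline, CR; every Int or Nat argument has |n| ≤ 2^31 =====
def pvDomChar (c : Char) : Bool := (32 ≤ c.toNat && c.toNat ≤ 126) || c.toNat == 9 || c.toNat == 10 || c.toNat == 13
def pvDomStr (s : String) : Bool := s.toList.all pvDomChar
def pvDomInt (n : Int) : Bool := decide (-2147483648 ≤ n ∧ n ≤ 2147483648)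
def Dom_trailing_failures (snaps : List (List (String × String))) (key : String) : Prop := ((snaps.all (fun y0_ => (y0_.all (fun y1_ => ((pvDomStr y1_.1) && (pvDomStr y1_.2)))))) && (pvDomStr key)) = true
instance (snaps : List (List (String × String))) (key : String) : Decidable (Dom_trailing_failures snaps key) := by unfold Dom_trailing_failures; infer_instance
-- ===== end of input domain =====

-- ===== PORT A =====
-- for snap in reversed(snaps): if snap.get(key) != "ok": count += 1 else: break
def tfGo (key : String) : List (List (String × String)) → Int
  | [] => 0
  | snap :: rest =>
      if (PySem.Dict.ofList snap).get? key ≠ some "ok" then 1 + tfGo key rest else 0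

def trailing_failures (snaps : List (List (String × String))) (key : String) : Int :=
  tfGo key snaps.reverse

-- ===== PORT B =====
-- one forward pass: state (i, last_ok); last_ok := i whenever snap.get(key) == "ok"
def trailing_failures_alt (snaps : List (List (String × String))) (key : String) : Int :=
  let st := snaps.foldl
    (fun (st : Int × Int) snap =>
      (st.1 + 1, if (PySem.Dict.ofList snap).get? key = some "ok" then st.1 else st.2))
    (0, -1)
  (snaps.length : Int) - 1 - st.2

-- ===== PRECONDITION & SPEC =====
def Spec_trailing_failures (snaps : List (List (String × String))) (key : String) (out : Int) : Prop := out = trailing_failures_alt snaps key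
instance (snaps : List (List (String × String))) (key : String) (out : Int) : Decidable (Spec_trailing_failures snaps key out) := by unfold Spec_trailing_failures; infer_instance

-- ===== CLAIM (what is proved, stated in full; the proofs are below) =====
def Claim_equal_trailing_failures : Prop := ∀ (snaps : List (List (String × String))) (key : String), Dom_trailing_failures snaps key → Spec_trailing_failures snaps key (trailing_failures snaps key)

-- ===== LEMMAS AND PROOFS =====

-- ===== VERDICT (by name: the statement is the Claim_ definition above) =====
def tfStep (key : String) (st : Int × Int) (snap : List (String × String)) : Int × Int :=
  (st.1 + 1, if (PySem.Dict.ofList snap).get? key = some "ok" then st.1 else st.2)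

theorem tf_fold_fst (key : String) (l : List (List (String × String))) (st : Int × Int) :
    (l.foldl (tfStep key) st).1 = st.1 + l.length := by
  induction l generalizing st with
  | nil => simp
  | cons x xs ih => simp [tfStep, ih]; ring

theorem tf_main (key : String) (l : List (List (String × String))) :
    tfGo key l.reverse = (l.length : Int) - 1 - (l.foldl (tfStep key) (0, -1)).2 := by
  induction l using List.reverseRecOn with
  | nil => simp [tfGo]
  | append_singleton xs x ih =>
      rw [List.reverse_append, List.foldl_append]
      by_cases h : (PySem.Dict.ofList x).get? key = some "ok"
      · simp [tfGo, tfStep, h, tf_fold_fst]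
      · simp only [List.reverse_singleton, List.singleton_append, tfGo, h,
          not_false_iff, if_pos, ne_eq, ih, List.foldl_cons, List.foldl_nil]
        simp [tfStep, h, List.length_append]
        ring

theorem trailing_failures_spec : Claim_equal_trailing_failures := by
  intro snaps key _
  show trailing_failures snaps key = trailing_failures_alt snaps key
  rw [trailing_failures, trailing_failures_alt]
  exact tf_main key snaps
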